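-- pv_equiv track=rewrite | github.com/snap-stanford/snap-python | swig/gen/genClassFn/archive/genClassFnExt.py | stripTypes
-- ===== SOURCE A (Python) =====
-- def stripTypes(decl):
--     returnStr = ""
--     currentArg = ""
--     for char in decl:
--         if char in (" ", "\t"):
--             currentArg = ""
--         elif char in (",",")"):
--             equalsIdx = currentArg.find("=")
--             if equalsIdx != -1:
--                 currentArg = currentArg[:equalsIdx]
--             returnStr += currentArg
--             returnStr += (char + " ")
--         else:
--             currentArg += char
--     return returnStr.strip()
-- ===== SOURCE B (Python) =====
-- def stripTypes(decl):
--     out = []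
--     for chunk in decl.replace("\t", " ").split(" "):
--         cur = ""
--         for ch in chunk:
--             if ch in (",", ")"):
--                 eq = cur.find("=")
--                 if eq != -1:
--                     cur = cur[:eq]
--                 out.append(cur + ch + " ")
--             else:
--                 cur += ch
--     return "".join(out).strip()
-- ===== Notes on version B (the rewrite author's own statement) =====
-- stated objective: alternative
-- what changed: Replaced A's single flat character loop (with in-loop reset of currentArg on whitespace) by an outer loop over chunks obtained by splitting on each single space/tab, with a fresh accumulator per chunk and an inner character loop handling only the delimiter/default cases.
import Mathlib
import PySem

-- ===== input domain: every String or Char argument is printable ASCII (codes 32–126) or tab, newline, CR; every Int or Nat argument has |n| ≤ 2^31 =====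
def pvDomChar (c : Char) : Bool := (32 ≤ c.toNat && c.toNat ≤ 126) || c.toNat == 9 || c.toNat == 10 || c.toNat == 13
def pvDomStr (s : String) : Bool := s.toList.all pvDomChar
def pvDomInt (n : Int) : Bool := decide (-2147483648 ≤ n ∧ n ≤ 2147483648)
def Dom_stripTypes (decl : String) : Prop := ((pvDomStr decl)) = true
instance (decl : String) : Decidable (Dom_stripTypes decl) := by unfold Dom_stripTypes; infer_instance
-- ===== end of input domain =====

-- B replaces A's single flat character pass with an outer loop over whitespace-separated
-- chunks and an inner character loop per chunk (objective: alternative decomposition, same cost).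


-- ===== PORT A =====
-- currentArg[:equalsIdx] truncation shared verbatim by both Pythons
def pvTrunc (cur : List Char) : List Char :=
  let equalsIdx := PySem.Chars.find cur ['=']
  if equalsIdx ≠ -1 then cur.take equalsIdx.toNat else cur

-- one step of A's flat for-loop over decl; state = (returnStr, currentArg)
def pvStepA (s : List Char × List Char) (c : Char) : List Char × List Char :=
  if c = ' ' ∨ c = '\t' then (s.1, [])
  else if c = ',' ∨ c = ')' then
    let cur := pvTrunc s.2
    (s.1 ++ cur ++ [c, ' '], cur)
  else (s.1, s.2 ++ [c])

def stripTypes (decl : String) : String :=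
  PySem.Str.strip (String.ofList (decl.toList.foldl pvStepA ([], [])).1)

-- ===== PORT B =====
-- decl.replace("\t"," ").split(" ") ported by hand: split on every single ' ' or '\t',
-- keeping empty chunks (exact on all inputs); returns head chunk and remaining chunks
def pvSplit : List Char → List Char × List (List Char)
  | [] => ([], [])
  | c :: cs =>
    let (h, t) := pvSplit cs
    if c = ' ' ∨ c = '\t' then ([], h :: t) else (c :: h, t)

-- one step of B's inner per-chunk loop; state = (out, cur)
def pvStepB (s : List Char × List Char) (c : Char) : List Char × List Char :=
  if c = ',' ∨ c = ')' then
    let cur := pvTrunc s.2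
    (s.1 ++ cur ++ [c, ' '], cur)
  else (s.1, s.2 ++ [c])

def stripTypes_alt (decl : String) : String :=
  let (h, t) := pvSplit decl.toList
  let chunks := h :: t
  PySem.Str.strip (String.ofList (chunks.foldl (fun r ch => (ch.foldl pvStepB (r, [])).1) []))

-- ===== PRECONDITION & SPEC =====
def Spec_stripTypes (decl : String) (out : String) : Prop := out = stripTypes_alt decl
instance (decl : String) (out : String) : Decidable (Spec_stripTypes decl out) := by unfold Spec_stripTypes; infer_instance

-- ===== CLAIM (what is proved, stated in full; the proofs are below) =====
def Claim_equal_stripTypes : Prop := ∀ (decl : String), Dom_stripTypes decl → Spec_stripTypes decl (stripTypes decl)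

-- ===== LEMMAS AND PROOFS =====
-- B's outer loop, written with the state threaded explicitly (proof-side helper)
def pvProc (s : List Char × List Char) : List (List Char) → List Char
  | [] => s.1
  | ch :: rest => pvProc ((ch.foldl pvStepB s).1, []) rest

theorem pvStepA_eq_stepB (s : List Char × List Char) (c : Char)
    (h : ¬ (c = ' ' ∨ c = '\t')) : pvStepA s c = pvStepB s c := by
  simp [pvStepA, pvStepB, h]

theorem pvFold_eq_proc (l : List Char) (s : List Char × List Char) :
    (l.foldl pvStepA s).1 = pvProc s (let (h, t) := pvSplit l; h :: t) := by
  induction l generalizing s with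
  | nil => simp [pvSplit, pvProc]
  | cons c cs ih =>
    by_cases hc : c = ' ' ∨ c = '\t'
    · have hs : pvStepA s c = (s.1, []) := by simp [pvStepA, hc]
      simp only [List.foldl_cons, hs, pvSplit, hc, if_pos]
      have := ih (s := (s.1, []))
      cases hst : pvSplit cs with
      | mk h t => simp [hst] at this ⊢; simpa [pvProc] using this
    · have hs : pvStepA s c = pvStepB s c := pvStepA_eq_stepB s c hc
      simp only [List.foldl_cons, hs, pvSplit, hc, ite_false]
      have := ih (s := pvStepB s c)
      cases hst : pvSplit cs with
      | mk h t => simp [hst] at this ⊢; simpa [pvProc] using this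
  
theorem pvProc_eq_foldl (L : List (List Char)) (r : List Char) :
    pvProc (r, []) L = L.foldl (fun r ch => (ch.foldl pvStepB (r, [])).1) r := by
  induction L generalizing r with
  | nil => rfl
  | cons ch rest ih => simp [pvProc, ih]

-- ===== VERDICT (by name: the statement is the Claim_ definition above) =====
theorem stripTypes_spec : Claim_equal_stripTypes := by
  intro decl _
  unfold Spec_stripTypes stripTypes stripTypes_alt
  have h1 := pvFold_eq_proc decl.toList ([], [])
  cases hst : pvSplit decl.toList with
  | mk h t =>
    simp only [hst] at h1 ⊢
    rw [h1, show pvProc (([] : List Char), ([] : List Char)) (h :: t)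
          = pvProc (((h.foldl pvStepB ([], [])).1, [])) t from rfl,
        pvProc_eq_foldl]
    rfl
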